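-- pv_equiv track=rewrite | github.com/MWJones96/ECM1408-CA1---Fall-2014 | q5.py | is_train_possible
-- ===== SOURCE A (Python) =====
-- def is_train_possible(capacity, stations):
--     in_train = 0
--     waiting = 0
--     for station in stations:
--         in_train -= station[0]
--         if in_train < 0:
--             return 'impossible'
--
--         in_train += station[1]
--         if in_train > capacity:
--             return 'impossible'
--
--         waiting = station[2]
--
--         if waiting > 0 and in_train < capacity:
--             return 'impossible'
--
--     return 'possible' if in_train == 0 and waiting == 0 else 'impossible'
-- ===== SOURCE B (Python) =====
-- def is_train_possible(capacity, stations):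
--     n = len(stations)
--
--     def load(k):
--         # train load just before station k, recomputed from scratch
--         return sum(s[1] - s[0] for s in stations[:k])
--
--     ok = all(load(i) - stations[i][0] >= 0
--              and load(i + 1) <= capacity
--              and not (stations[i][2] > 0 and load(i + 1) < capacity)
--              for i in range(n)) \
--         and load(n) == 0 \
--         and (n == 0 or stations[n - 1][2] == 0)
--     return 'possible' if ok else 'impossible'
-- ===== Notes on version B (the rewrite author's own statement) =====
-- stated objective: alternative
-- what changed: Replaces A's single mutating simulation loop with early returns by a stateless closed-form formulation: the load before each station is recomputed independently as a prefix sum over a slice, and per-station feasibility plus the final load/waiting conditions are checked as aggregate all() predicates over indices.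
import Mathlib
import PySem

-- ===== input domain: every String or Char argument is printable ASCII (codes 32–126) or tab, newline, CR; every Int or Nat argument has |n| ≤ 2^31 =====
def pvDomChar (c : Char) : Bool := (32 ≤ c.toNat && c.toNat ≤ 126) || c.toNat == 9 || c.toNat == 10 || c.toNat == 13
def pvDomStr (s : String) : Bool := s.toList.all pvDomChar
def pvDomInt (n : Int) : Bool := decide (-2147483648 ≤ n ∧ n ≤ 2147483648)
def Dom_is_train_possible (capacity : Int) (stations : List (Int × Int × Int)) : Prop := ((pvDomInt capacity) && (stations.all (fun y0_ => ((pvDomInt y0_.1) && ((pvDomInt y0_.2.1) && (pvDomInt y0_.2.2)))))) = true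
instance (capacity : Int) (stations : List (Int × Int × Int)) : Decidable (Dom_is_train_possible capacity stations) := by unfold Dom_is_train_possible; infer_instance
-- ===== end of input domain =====

-- B replaces A's mutating simulation loop (early returns, running accumulator) by stateless
-- per-station checks whose loads are recomputed as prefix sums; objective: alternative, not faster.

-- ===== PORT A =====
-- A's loop with early returns, as structural recursion over (in_train, waiting, stations)
def pvGoA (capacity : Int) (in_train waiting : Int) : List (Int × Int × Int) → String
  | [] => if in_train = 0 ∧ waiting = 0 then "possible" else "impossible"
  | s :: rest =>
    let t1 := in_train - s.1
    if t1 < 0 then "impossible"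
    else
      let t2 := t1 + s.2.1
      if t2 > capacity then "impossible"
      else
        let w := s.2.2
        if w > 0 ∧ t2 < capacity then "impossible"
        else pvGoA capacity t2 w rest

def is_train_possible (capacity : Int) (stations : List (Int × Int × Int)) : String :=
  pvGoA capacity 0 0 stations

-- ===== PORT B =====
-- Source B's load(k): sum of s[1]-s[0] over the slice stations[:k] (k is a Nat index here)
def pvLoad (stations : List (Int × Int × Int)) (k : Nat) : Int :=
  ((stations.take k).map (fun s => s.2.1 - s.1)).sum

def is_train_possible_alt (capacity : Int) (stations : List (Int × Int × Int)) : String :=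
  let n := stations.length
  let ok :=
    (List.range n).all (fun i =>
        decide (pvLoad stations i - (stations.getD i (0, 0, 0)).1 ≥ 0) &&
        decide (pvLoad stations (i + 1) ≤ capacity) &&
        !(decide ((stations.getD i (0, 0, 0)).2.2 > 0) &&
          decide (pvLoad stations (i + 1) < capacity))) &&
    decide (pvLoad stations n = 0) &&
    (decide (n = 0) || decide ((stations.getD (n - 1) (0, 0, 0)).2.2 = 0))
  if ok then "possible" else "impossible"

-- ===== PRECONDITION & SPEC =====
def Spec_is_train_possible (capacity : Int) (stations : List (Int × Int × Int)) (out : String) : Prop := out = is_train_possible_alt capacity stations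
instance (capacity : Int) (stations : List (Int × Int × Int)) (out : String) : Decidable (Spec_is_train_possible capacity stations out) := by unfold Spec_is_train_possible; infer_instance

-- ===== CLAIM (what is proved, stated in full; the proofs are below) =====
def Claim_equal_is_train_possible : Prop := ∀ (capacity : Int) (stations : List (Int × Int × Int)), Dom_is_train_possible capacity stations → Spec_is_train_possible capacity stations (is_train_possible capacity stations)

-- ===== LEMMAS AND PROOFS =====

-- proof-side recursive characterisation of "no violation and final state clean"
def pvSpecB (capacity load w : Int) : List (Int × Int × Int) → Bool
  | [] => decide (load = 0) && decide (w = 0)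
  | s :: rest =>
      decide (0 ≤ load - s.1) && decide (load - s.1 + s.2.1 ≤ capacity) &&
      !(decide (s.2.2 > 0) && decide (load - s.1 + s.2.1 < capacity)) &&
      pvSpecB capacity (load - s.1 + s.2.1) s.2.2 rest

-- proof-side name for the last-station test, in match form
def pvTailChk (w : Int) (l : List (Int × Int × Int)) : Bool :=
  match l.getLast? with
  | none => decide (w = 0)
  | some s => decide (s.2.2 = 0)

theorem pvGoA_eq_spec (capacity load w : Int) (l : List (Int × Int × Int)) :
    pvGoA capacity load w l = if pvSpecB capacity load w l then "possible" else "impossible" := by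
  induction l generalizing load w with
  | nil =>
    simp only [pvGoA, pvSpecB]
    by_cases h : load = 0 ∧ w = 0
    · simp [h.1, h.2]
    · rw [if_neg h]
      have : (decide (load = 0) && decide (w = 0)) = false := by
        rcases not_and_or.mp h with h' | h' <;> simp [h']
      simp [this]
  | cons s rest ih =>
    simp only [pvGoA, pvSpecB]
    by_cases h1 : load - s.1 < 0
    · have e : decide (0 ≤ load - s.1) = false := by simp; omega
      rw [if_pos h1]
      simp only [e, Bool.false_and, Bool.false_eq_true, if_false]
    · by_cases h2 : load - s.1 + s.2.1 > capacity
      · have e : decide (load - s.1 + s.2.1 ≤ capacity) = false := by simp; omega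
        rw [if_neg h1, if_pos h2]
        simp only [e, Bool.false_and, Bool.and_false, Bool.false_eq_true, if_false]
      · by_cases h3 : s.2.2 > 0 ∧ load - s.1 + s.2.1 < capacity
        · have e : (!(decide (s.2.2 > 0) && decide (load - s.1 + s.2.1 < capacity))) = false := by
            simp [h3.1, h3.2]
          rw [if_neg h1, if_neg h2, if_pos h3]
          simp only [e, Bool.false_and, Bool.and_false, Bool.false_eq_true, if_false]
        · simp only [if_neg h1, if_neg h2, if_neg h3, ih]
          have e1 : decide (0 ≤ load - s.1) = true := by simp; omega
          have e2 : decide (load - s.1 + s.2.1 ≤ capacity) = true := by simp; omega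
          have e3 : (!(decide (s.2.2 > 0) && decide (load - s.1 + s.2.1 < capacity))) = true := by
            simp; omega
          simp only [e1, e2, e3, Bool.true_and]

theorem pvLoad_zero (l : List (Int × Int × Int)) : pvLoad l 0 = 0 := rfl

theorem pvLoad_cons (s : Int × Int × Int) (l : List (Int × Int × Int)) (k : Nat) :
    pvLoad (s :: l) (k + 1) = (s.2.1 - s.1) + pvLoad l k := by
  simp [pvLoad, List.take_succ_cons]

theorem pvTailChk_cons (w : Int) (s : Int × Int × Int) (rest : List (Int × Int × Int)) :
    pvTailChk w (s :: rest) = pvTailChk s.2.2 rest := by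
  cases rest with
  | nil => rfl
  | cons a t =>
    cases h2 : (a :: t).getLast? with
    | none => exact absurd (List.getLast?_eq_none_iff.mp h2) (by simp)
    | some u => simp [pvTailChk, List.getLast?_cons_cons, h2]

-- B's aggregate check, generalised to base load L and with the tail test in match form,
-- equals the recursive characterisation
theorem pvAgg_eq_spec (capacity L w : Int) (l : List (Int × Int × Int)) :
    ((List.range l.length).all (fun i =>
        decide (L + pvLoad l i - (l.getD i (0, 0, 0)).1 ≥ 0) &&
        decide (L + pvLoad l (i + 1) ≤ capacity) &&
        !(decide ((l.getD i (0, 0, 0)).2.2 > 0) &&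
          decide (L + pvLoad l (i + 1) < capacity))) &&
     decide (L + pvLoad l l.length = 0) &&
     pvTailChk w l) = pvSpecB capacity L w l := by
  induction l generalizing L w with
  | nil => simp [pvSpecB, pvLoad, pvTailChk]
  | cons s rest ih =>
    have hrange : List.range ((s :: rest).length) = 0 :: (List.range rest.length).map Nat.succ := by
      rw [List.length_cons]; exact List.range_succ_eq_map
    rw [hrange]
    simp only [List.all_cons, List.all_map, Function.comp_def, Nat.succ_eq_add_one,
      pvLoad_cons, pvLoad_zero, List.getD_cons_zero, List.getD_cons_succ,
      add_zero, ← add_assoc, ge_iff_le, List.length_cons, pvTailChk_cons]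
    simp only [pvSpecB]
    rw [show L - s.1 + s.2.1 = L + (s.2.1 - s.1) from by ring]
    have ih' := ih (L + (s.2.1 - s.1)) s.2.2
    simp only [ge_iff_le] at ih'
    rw [← ih']
    simp only [Bool.and_assoc]

-- Source B's last-station test (n == 0 or stations[n-1][2] == 0) equals the match form at w = 0
theorem pvTail_eq (l : List (Int × Int × Int)) :
    (decide (l.length = 0) || decide ((l.getD (l.length - 1) (0, 0, 0)).2.2 = 0)) =
      pvTailChk 0 l := by
  cases l with
  | nil => decide
  | cons a t =>
    cases h : (a :: t).getLast? with
    | none => exact absurd (List.getLast?_eq_none_iff.mp h) (by simp)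
    | some u =>
      have hlt : t.length < (a :: t).length := by simp
      have h' : (a :: t)[t.length]? = some u := by
        rw [List.getLast?_eq_getElem?] at h; simpa using h
      have hgu : (a :: t)[t.length] = u := by
        rw [List.getElem?_eq_getElem hlt] at h'
        exact Option.some_injective _ h'
      simp [pvTailChk, h]
      exact iff_of_eq (congrArg (fun x => x.2.2 = 0) hgu)

-- ===== VERDICT (by name: the statement is the Claim_ definition above) =====
theorem is_train_possible_spec : Claim_equal_is_train_possible := by
  intro capacity stations _
  show pvGoA capacity 0 0 stations = is_train_possible_alt capacity stations
  have hb := pvAgg_eq_spec capacity 0 0 stations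
  simp only [zero_add] at hb
  have ht := pvTail_eq stations
  rw [pvGoA_eq_spec, ← hb, ← ht]
  rfl
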